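-- pv_equiv track=rewrite | github.com/narmi46/Tesserect_Regen | rhb.py | split_tokens_glued
-- ===== SOURCE A (Python) =====
-- KNOWN_TOKENS = [
--     "CDT", "CASH", "DEPOSIT",
--     "ANNUAL", "FEES",
--     "DUITNOW", "QR", "P2P", "CR", "DR",
--     "RPP", "INWARD", "INST", "TRF",
--     "MBK", "INSTANT",
--     "MYDEBIT", "FUND", "MB", "ATM",
--     "WITHDRAWAL", "PAYMENT", "TRANSFER"
-- ]
--
-- def split_tokens_glued(text: str) -> str:
--     """
--     Split glued tokens in the description based on KNOWN_TOKENS.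
--     Example: 'DUITNOWQRP2PCR' → 'DUITNOW QR P2P CR'
--     """
--     s = text
--     result = []
--
--     while s:
--         matched = False
--         for tok in sorted(KNOWN_TOKENS, key=len, reverse=True):
--             if s.startswith(tok):
--                 result.append(tok)
--                 s = s[len(tok):]
--                 matched = True
--                 break
--         if not matched:
--             result.append(s[0])
--             s = s[1:]
--
--     out, buf = [], ""
--     for p in result:
--         if p in KNOWN_TOKENS:
--             if buf:
--                 out.append(buf)
--                 buf = ""
--             out.append(p)
--         else:
--             buf += p
--     if buf:
--         out.append(buf)
--
--     return " ".join(out)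
-- ===== SOURCE B (Python) =====
-- KNOWN_TOKENS = [
--     "CDT", "CASH", "DEPOSIT",
--     "ANNUAL", "FEES",
--     "DUITNOW", "QR", "P2P", "CR", "DR",
--     "RPP", "INWARD", "INST", "TRF",
--     "MBK", "INSTANT",
--     "MYDEBIT", "FUND", "MB", "ATM",
--     "WITHDRAWAL", "PAYMENT", "TRANSFER"
-- ]
--
-- def split_tokens_glued(text: str) -> str:
--     # One fused pass: sort the token list once, walk the text by index,
--     # flush the running buffer of unmatched chars whenever a token matches.
--     toks = sorted(KNOWN_TOKENS, key=len, reverse=True)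
--     out, buf = [], ""
--     i = 0
--     n = len(text)
--     while i < n:
--         for tok in toks:
--             if text.startswith(tok, i):
--                 if buf:
--                     out.append(buf)
--                     buf = ""
--                 out.append(tok)
--                 i += len(tok)
--                 break
--         else:
--             buf += text[i]
--             i += 1
--     if buf:
--         out.append(buf)
--     return " ".join(out)
-- ===== Notes on version B (the rewrite author's own statement) =====
-- stated objective: simpler
-- what changed: Fused A's two passes (greedy tokenize into an intermediate result list, then a separate regrouping pass) into one loop that walks the text with an output list and a running buffer, flushing the buffer at each token match; the token list is sorted once instead of on every loop iteration.
import Mathlib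
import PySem

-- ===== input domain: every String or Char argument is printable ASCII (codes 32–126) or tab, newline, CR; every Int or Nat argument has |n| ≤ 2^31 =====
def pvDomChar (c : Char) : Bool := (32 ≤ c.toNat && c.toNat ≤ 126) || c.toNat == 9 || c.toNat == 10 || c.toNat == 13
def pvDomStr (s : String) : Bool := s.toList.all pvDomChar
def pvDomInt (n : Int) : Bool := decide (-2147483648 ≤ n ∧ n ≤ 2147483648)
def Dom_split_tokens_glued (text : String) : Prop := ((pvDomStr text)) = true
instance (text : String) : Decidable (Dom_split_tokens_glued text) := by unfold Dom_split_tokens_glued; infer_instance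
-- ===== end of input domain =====

-- B fuses A's two passes (greedy tokenize, then regroup) into one loop with an output
-- list and a running buffer, sorting the token list once; objective: simpler.

-- ===== PORT A =====
-- KNOWN_TOKENS, as lists of code points (exact for ASCII literals)
def pvKnownTokens : List (List Char) :=
  ["CDT", "CASH", "DEPOSIT",
   "ANNUAL", "FEES",
   "DUITNOW", "QR", "P2P", "CR", "DR",
   "RPP", "INWARD", "INST", "TRF",
   "MBK", "INSTANT",
   "MYDEBIT", "FUND", "MB", "ATM",
   "WITHDRAWAL", "PAYMENT", "TRANSFER"].map String.toList

-- sorted(KNOWN_TOKENS, key=len, reverse=True)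
def pvSortedTokens : List (List Char) :=
  PySem.List.sorted pvKnownTokens (fun t => (t.length : Int)) true

theorem pvSortedTok_mem_len {tok : List Char} (h : tok ∈ pvSortedTokens) :
    0 < tok.length := by
  have hm : tok ∈ pvKnownTokens := (PySem.List.mem_sorted _ _ _ _).1 h
  have : ∀ t ∈ pvKnownTokens, 0 < t.length := by decide
  exact this _ hm

-- the while-loop of A: greedy longest-known-prefix tokenization, producing `result`
-- (for tok in sorted(...): if s.startswith(tok): break  ≡  List.find? over the sorted list)
def pvLoopA (s : List Char) : List (List Char) :=
  if hs : s = [] then []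
  else
    match hf : pvSortedTokens.find? (fun t => t.isPrefixOf s) with
    | some tok => tok :: pvLoopA (s.drop tok.length)
    | none => [s.head hs] :: pvLoopA s.tail
termination_by s.length
decreasing_by
  · have htok := pvSortedTok_mem_len (List.mem_of_find?_eq_some hf)
    have : 0 < s.length := List.length_pos_iff.mpr hs
    simp [List.length_drop]; omega
  · have : 0 < s.length := List.length_pos_iff.mpr hs
    simp [List.length_tail]; omega

-- the second for-loop of A: regroup single chars between tokens into buffers
def pvRegroupStep (st : List (List Char) × List Char) (p : List Char) :
    List (List Char) × List Char :=
  if p ∈ pvKnownTokens then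
    ((st.1 ++ (if st.2 = [] then [] else [st.2])) ++ [p], [])
  else (st.1, st.2 ++ p)

def pvFinish (st : List (List Char) × List Char) : List (List Char) :=
  st.1 ++ (if st.2 = [] then [] else [st.2])

def split_tokens_glued (text : String) : String :=
  String.ofList (PySem.Chars.join [' ']
    (pvFinish ((pvLoopA text.toList).foldl pvRegroupStep ([], []))))

-- ===== PORT B =====
-- Source B's single fused loop: walk the text, flush the buffer on each token match
-- (the index walk `text.startswith(tok, i)` is ported as matching on the remaining suffix — exact)
def pvLoopB (s : List Char) (out : List (List Char)) (buf : List Char) :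
    List (List Char) :=
  if hs : s = [] then out ++ (if buf = [] then [] else [buf])
  else
    match hf : pvSortedTokens.find? (fun t => t.isPrefixOf s) with
    | some tok =>
        pvLoopB (s.drop tok.length) ((out ++ (if buf = [] then [] else [buf])) ++ [tok]) []
    | none => pvLoopB s.tail out (buf ++ [s.head hs])
termination_by s.length
decreasing_by
  · have htok := pvSortedTok_mem_len (List.mem_of_find?_eq_some hf)
    have : 0 < s.length := List.length_pos_iff.mpr hs
    simp [List.length_drop]; omega
  · have : 0 < s.length := List.length_pos_iff.mpr hs
    simp [List.length_tail]; omega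

def split_tokens_glued_alt (text : String) : String :=
  String.ofList (PySem.Chars.join [' '] (pvLoopB text.toList [] []))

-- ===== PRECONDITION & SPEC =====
def Spec_split_tokens_glued (text : String) (out : String) : Prop := out = split_tokens_glued_alt text
instance (text : String) (out : String) : Decidable (Spec_split_tokens_glued text out) := by unfold Spec_split_tokens_glued; infer_instance

-- ===== CLAIM (what is proved, stated in full; the proofs are below) =====
def Claim_equal_split_tokens_glued : Prop := ∀ (text : String), Dom_split_tokens_glued text → Spec_split_tokens_glued text (split_tokens_glued text)

-- ===== LEMMAS AND PROOFS =====

-- matched tokens are known tokens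
theorem pv_find_mem {s tok : List Char}
    (h : pvSortedTokens.find? (fun t => t.isPrefixOf s) = some tok) :
    tok ∈ pvKnownTokens :=
  (PySem.List.mem_sorted _ _ _ _).1 (List.mem_of_find?_eq_some h)

-- a single character is never a known token (all tokens have length ≥ 2)
theorem pv_single_not_mem (c : Char) : [c] ∉ pvKnownTokens := by
  intro h
  have : ∀ t ∈ pvKnownTokens, 2 ≤ t.length := by decide
  have := this _ h
  simp at this

-- unfolding equations for the two loops
theorem pvLoopA_some {s tok : List Char} (hs : s ≠ [])
    (hf : pvSortedTokens.find? (fun t => t.isPrefixOf s) = some tok) :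
    pvLoopA s = tok :: pvLoopA (s.drop tok.length) := by
  rw [pvLoopA]; simp only [hs, dite_false]
  split <;> rename_i heq <;> rw [hf] at heq <;> simp_all

theorem pvLoopA_none {s : List Char} (hs : s ≠ [])
    (hf : pvSortedTokens.find? (fun t => t.isPrefixOf s) = none) :
    pvLoopA s = [s.head hs] :: pvLoopA s.tail := by
  rw [pvLoopA]; simp only [hs, dite_false]
  split <;> rename_i heq <;> rw [hf] at heq <;> simp_all

theorem pvLoopB_some {s tok : List Char} (hs : s ≠ [])
    (hf : pvSortedTokens.find? (fun t => t.isPrefixOf s) = some tok) (out buf) :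
    pvLoopB s out buf =
      pvLoopB (s.drop tok.length) ((out ++ (if buf = [] then [] else [buf])) ++ [tok]) [] := by
  rw [pvLoopB]; simp only [hs, dite_false]
  split <;> rename_i heq <;> rw [hf] at heq <;> simp_all

theorem pvLoopB_none {s : List Char} (hs : s ≠ [])
    (hf : pvSortedTokens.find? (fun t => t.isPrefixOf s) = none) (out buf) :
    pvLoopB s out buf = pvLoopB s.tail out (buf ++ [s.head hs]) := by
  rw [pvLoopB]; simp only [hs, dite_false]
  split <;> rename_i heq <;> rw [hf] at heq <;> simp_all

-- B's fused loop computes A's regrouping fold over A's token stream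
theorem pv_loopB_eq (s : List Char) :
    ∀ out buf, pvLoopB s out buf = pvFinish ((pvLoopA s).foldl pvRegroupStep (out, buf)) := by
  induction s using pvLoopA.induct with
  | case1 =>
      intro out buf
      rw [pvLoopA]
      simp [pvLoopB, pvFinish]
  | case2 s hs tok hf ih =>
      intro out buf
      rw [pvLoopB_some hs hf, pvLoopA_some hs hf, ih]
      have hstep : pvRegroupStep (out, buf) tok =
          ((out ++ (if buf = [] then [] else [buf])) ++ [tok], []) := by
        simp [pvRegroupStep, pv_find_mem hf]
      rw [List.foldl_cons, hstep]
  | case3 s hs hf ih =>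
      intro out buf
      rw [pvLoopB_none hs hf, pvLoopA_none hs hf, ih]
      have hstep : pvRegroupStep (out, buf) [s.head hs] = (out, buf ++ [s.head hs]) := by
        simp [pvRegroupStep, pv_single_not_mem]
      rw [List.foldl_cons, hstep]

-- ===== VERDICT (by name: the statement is the Claim_ definition above) =====
theorem split_tokens_glued_spec : Claim_equal_split_tokens_glued := by
  intro text _
  unfold Spec_split_tokens_glued split_tokens_glued split_tokens_glued_alt
  rw [pv_loopB_eq]
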